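-- pv_equiv track=rewrite | github.com/xiangli-sophgo/CrossRing | src/utils/traffic_ip_extractor.py | infer_channel_spec
-- ===== SOURCE A (Python) =====
-- from typing import Set, Tuple, Dict, List
--
-- def infer_channel_spec(ip_types: List[str]) -> Dict[str, int]:
--     """
--     从IP类型列表反向推断CHANNEL_SPEC配置
--
--     Args:
--         ip_types: IP类型列表,如["gdma_0", "gdma_1", "ddr_0"]
--
--     Returns:
--         CHANNEL_SPEC字典,如{"gdma": 2, "ddr": 1}
--     """
--     from collections import defaultdict
--
--     channel_counts = defaultdict(set)
--
--     for ip_type in ip_types: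
--         # 分离基础类型和索引
--         # 处理"gdma_0"和"d2d_rn_0"两种情况
--         if '_' in ip_type:
--             parts = ip_type.rsplit('_', 1)
--             base_type = parts[0]
--             idx_str = parts[1]
--
--             try:
--                 idx = int(idx_str)
--                 channel_counts[base_type].add(idx)
--             except ValueError:
--                 # 无法解析为数字,可能是特殊IP类型
--                 pass
--
--     # 计算每种类型的数量(最大索引+1)
--     channel_spec = {}
--     for base_type, indices in channel_counts.items():
--         if indices:
--             channel_spec[base_type] = max(indices) + 1
--
--     return channel_spec
-- ===== SOURCE B (Python) =====
-- from typing import Dict, List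
--
--
-- def infer_channel_spec(ip_types: List[str]) -> Dict[str, int]:
--     """Staged variant: flatten to (base, idx) pairs, dedup the bases in first-seen
--     order, then answer each base with one max-scan over the pairs."""
--     pairs = []
--     for ip_type in ip_types:
--         base, sep, idx_str = ip_type.rpartition('_')
--         if sep:
--             try:
--                 pairs.append((base, int(idx_str)))
--             except ValueError:
--                 pass
--     seen = []
--     for base, _ in pairs:
--         if base not in seen:
--             seen.append(base)
--     return {base: max(i for b, i in pairs if b == base) + 1 for base in seen}
-- ===== Notes on version B (the rewrite author's own statement) =====
-- stated objective: alternative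
-- what changed: B replaces A's single-pass dict-of-index-sets plus max()-per-set pass by a staged pipeline: flatten the input to a plain (base, idx) pair list, dedup the bases in first-seen order, then compute each count with a direct max-scan over the pair list.
import Mathlib
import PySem

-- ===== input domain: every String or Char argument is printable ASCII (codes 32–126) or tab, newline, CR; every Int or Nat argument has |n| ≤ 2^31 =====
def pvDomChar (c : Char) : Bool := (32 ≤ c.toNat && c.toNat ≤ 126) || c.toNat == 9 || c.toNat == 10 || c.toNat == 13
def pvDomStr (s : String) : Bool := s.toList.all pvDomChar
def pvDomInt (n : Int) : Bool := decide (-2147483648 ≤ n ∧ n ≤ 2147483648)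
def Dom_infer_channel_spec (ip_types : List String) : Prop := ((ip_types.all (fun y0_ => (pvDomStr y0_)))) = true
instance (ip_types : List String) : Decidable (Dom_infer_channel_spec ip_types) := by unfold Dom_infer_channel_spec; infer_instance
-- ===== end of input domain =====

-- B replaces A's dict-of-index-sets (plus a second max()-per-set pass) by a staged
-- pipeline: parse to a flat (base, idx) pair list, dedup the bases in first-seen
-- order, then answer each base with one direct max-scan over the pair list
-- (objective: alternative decomposition, no dict of sets).

-- ===== PORT A =====
-- Hand port of «'_' in s» + «s.rsplit('_', 1)» fused: splits the character list at the
-- LAST '_' (exact: some (before, after) when '_' occurs, none when it does not).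
def pvRSplitUnd : List Char → Option (List Char × List Char)
  | [] => none
  | c :: rest =>
    match pvRSplitUnd rest with
    | some (b, t) => some (c :: b, t)
    | none => if c = '_' then some ([], rest) else none

def infer_channel_spec (ip_types : List String) : List (String × Int) :=
  let channel_counts : PySem.Dict String (PySem.Set Int) :=
    ip_types.foldl (fun d ip_type =>
      match pvRSplitUnd ip_type.toList with
      | none => d
      | some (b, t) =>
        match PySem.Int.ofChars? t with
        | none => d  -- ValueError: pass
        | some idx =>
          d.insert (String.ofList b) (PySem.Set.add (d.getD (String.ofList b) PySem.Set.empty) idx))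
      PySem.Dict.empty
  let channel_spec : PySem.Dict String Int :=
    channel_counts.items.foldl (fun spec p =>
      if p.2 ≠ [] then
        match PySem.List.max? p.2 (fun x => x) with  -- max(indices); none unreachable (guarded nonempty)
        | some m => spec.insert p.1 (m + 1)
        | none => spec
      else spec)
      PySem.Dict.empty
  channel_spec.items

-- ===== PORT B =====
-- Hand port of «s.rpartition('_')» restricted to what B consumes: scan the REVERSED
-- characters up to the first '_' (exact: some (before, after) when '_' occurs,
-- none = empty separator, i.e. no '_' in the string).
def pvRPart (cs : List Char) : Option (List Char × List Char) :=
  match (cs.reverse).dropWhile (fun c => !(c == '_')) with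
  | [] => none
  | _ :: pre => some (pre.reverse, ((cs.reverse).takeWhile (fun c => !(c == '_'))).reverse)

def infer_channel_spec_alt (ip_types : List String) : List (String × Int) :=
  -- stage 1: flatten to (base, idx) pairs
  let pairs : List (String × Int) :=
    ip_types.foldl (fun acc ip_type =>
      match pvRPart ip_type.toList with
      | none => acc  -- empty sep: skipped
      | some (b, t) =>
        match PySem.Int.ofChars? t with
        | none => acc  -- ValueError: pass
        | some idx => acc ++ [(String.ofList b, idx)]) []
  -- stage 2: bases in first-seen order
  let seen : List String :=
    pairs.foldl (fun s p => if p.1 ∈ s then s else s ++ [p.1]) []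
  -- stage 3: dict comprehension, one max-scan per base
  (seen.foldl (fun d base =>
      match PySem.List.max? ((pairs.filter (fun q => q.1 == base)).map (fun q => q.2)) (fun x => x) with
      | some m => d.insert base (m + 1)
      | none => d  -- unreachable: base ∈ seen, so the filtered list is nonempty (Python's max would raise)
    ) PySem.Dict.empty).items

-- ===== PRECONDITION & SPEC =====
def Spec_infer_channel_spec (ip_types : List String) (out : List (String × Int)) : Prop := out = infer_channel_spec_alt ip_types
instance (ip_types : List String) (out : List (String × Int)) : Decidable (Spec_infer_channel_spec ip_types out) := by unfold Spec_infer_channel_spec; infer_instance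

-- ===== CLAIM (what is proved, stated in full; the proofs are below) =====
def Claim_equal_infer_channel_spec : Prop := ∀ (ip_types : List String), Dom_infer_channel_spec ip_types → Spec_infer_channel_spec ip_types (infer_channel_spec ip_types)

-- ===== LEMMAS AND PROOFS =====

-- max of a nonempty list (0 for [] is never used)
def pvMaxD : List Int → Int
  | [] => 0
  | x :: t => t.foldl max x

theorem pvMax?_eq_pvMaxD (xs : List Int) (h : xs ≠ []) :
    PySem.List.max? xs (fun y => y) = some (pvMaxD xs) := by
  cases xs with
  | nil => exact absurd rfl h
  | cons x t => rw [PySem.List.max?_id_cons]; rfl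

-- the two underscore-splitters agree: snoc recursion for A's splitter …
theorem pvRSplit_snoc (ys : List Char) (c : Char) :
    pvRSplitUnd (ys ++ [c])
      = if c = '_' then some (ys, [])
        else (pvRSplitUnd ys).map (fun p => (p.1, p.2 ++ [c])) := by
  induction ys with
  | nil => by_cases h : c = '_' <;> simp [pvRSplitUnd, h]
  | cons y t ih =>
    by_cases h : c = '_'
    · simp only [List.cons_append, pvRSplitUnd, ih, if_pos h]
    · simp only [List.cons_append, pvRSplitUnd, ih, if_neg h]
      cases hs : pvRSplitUnd t with
      | some p => simp
      | none => by_cases hy : y = '_' <;> simp [hy]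

-- … matched by B's reverse-scan splitter
theorem pvRPart_eq (cs : List Char) : pvRPart cs = pvRSplitUnd cs := by
  induction cs using List.reverseRecOn with
  | nil => rfl
  | append_singleton ys c ih =>
    rw [pvRSplit_snoc]
    by_cases h : c = '_'
    · simp [pvRPart, h]
    · have hc : (!(c == '_')) = true := by simp [h]
      rw [← ih]
      simp only [pvRPart, List.reverse_append, List.reverse_cons, List.reverse_nil,
        List.nil_append, List.singleton_append, List.dropWhile_cons, List.takeWhile_cons, hc]
      cases hd : (ys.reverse).dropWhile (fun c => !(c == '_')) with
      | nil => simp [h]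
      | cons d pre => simp [h]

-- the common parse step both loops perform on one string
def pvParse (s : String) : Option (String × Int) :=
  match pvRSplitUnd s.toList with
  | none => none
  | some (b, t) =>
    match PySem.Int.ofChars? t with
    | none => none
    | some idx => some (String.ofList b, idx)

-- A's dict-building loop is the same loop over the parsed pairs
theorem hoistA (l : List String) (d : PySem.Dict String (PySem.Set Int)) :
    l.foldl (fun d ip_type =>
      match pvRSplitUnd ip_type.toList with
      | none => d
      | some (b, t) =>
        match PySem.Int.ofChars? t with
        | none => d
        | some idx =>
          d.insert (String.ofList b) (PySem.Set.add (d.getD (String.ofList b) PySem.Set.empty) idx)) d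
    = (l.filterMap pvParse).foldl
        (fun d p => d.insert p.1 (PySem.Set.add (d.getD p.1 PySem.Set.empty) p.2)) d := by
  induction l generalizing d with
  | nil => rfl
  | cons x rest ih =>
    simp only [List.foldl_cons, List.filterMap_cons]
    cases hs : pvRSplitUnd x.toList with
    | none => simpa [pvParse, hs] using ih d
    | some p =>
      obtain ⟨b, t⟩ := p
      cases ho : PySem.Int.ofChars? t with
      | none => simpa [pvParse, hs, ho] using ih d
      | some idx => simpa [pvParse, hs, ho] using ih _

-- B's pair-collecting loop collects exactly the parsed pairs
theorem hoistB' (l : List String) (acc : List (String × Int)) :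
    l.foldl (fun acc ip_type =>
      match pvRSplitUnd ip_type.toList with
      | none => acc
      | some (b, t) =>
        match PySem.Int.ofChars? t with
        | none => acc
        | some idx => acc ++ [(String.ofList b, idx)]) acc
    = acc ++ l.filterMap pvParse := by
  induction l generalizing acc with
  | nil => simp
  | cons x rest ih =>
    simp only [List.foldl_cons, List.filterMap_cons]
    cases hs : pvRSplitUnd x.toList with
    | none =>
      have hpx : pvParse x = none := by simp [pvParse, hs]
      simp only [hpx]
      exact ih acc
    | some p =>
      obtain ⟨b, t⟩ := p
      cases ho : PySem.Int.ofChars? t with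
      | none =>
        have hpx : pvParse x = none := by simp [pvParse, hs, ho]
        simp only [ho, hpx]
        exact ih acc
      | some idx =>
        have hpx : pvParse x = some (String.ofList b, idx) := by simp [pvParse, hs, ho]
        simp only [ho, hpx]
        rw [ih]
        simp

theorem hoistB (l : List String) (acc : List (String × Int)) :
    l.foldl (fun acc ip_type =>
      match pvRPart ip_type.toList with
      | none => acc
      | some (b, t) =>
        match PySem.Int.ofChars? t with
        | none => acc
        | some idx => acc ++ [(String.ofList b, idx)]) acc
    = acc ++ l.filterMap pvParse := by
  have hfun : (fun (acc : List (String × Int)) (ip_type : String) =>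
      match pvRPart ip_type.toList with
      | none => acc
      | some (b, t) =>
        match PySem.Int.ofChars? t with
        | none => acc
        | some idx => acc ++ [(String.ofList b, idx)])
    = (fun acc ip_type =>
      match pvRSplitUnd ip_type.toList with
      | none => acc
      | some (b, t) =>
        match PySem.Int.ofChars? t with
        | none => acc
        | some idx => acc ++ [(String.ofList b, idx)]) := by
    funext acc ip_type
    rw [pvRPart_eq]
  rw [hfun, hoistB']

-- a value in A's dict is Set.add folded over the indices filed under that key
theorem getD_fold (l : List (String × Int)) (d : PySem.Dict String (PySem.Set Int)) (k : String) :
    (l.foldl (fun d p => d.insert p.1 (PySem.Set.add (d.getD p.1 PySem.Set.empty) p.2)) d).getD k PySem.Set.empty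
    = ((l.filter (fun q => q.1 == k)).map (fun q => q.2)).foldl PySem.Set.add (d.getD k PySem.Set.empty) := by
  induction l generalizing d with
  | nil => rfl
  | cons p rest ih =>
    simp only [List.foldl_cons, List.filter_cons]
    by_cases h : p.1 = k
    · have hb : (p.1 == k) = true := by simp [h]
      simp only [hb, if_true, List.map_cons, List.foldl_cons]
      rw [ih, PySem.Dict.getD_insert, if_pos h.symm, h]
    · have hb : (p.1 == k) = false := by simp [h]
      rw [ih, PySem.Dict.getD_insert, if_neg (fun hk => h hk.symm)]
      simp [hb]

theorem add_ne_nil (s : PySem.Set Int) (i : Int) : PySem.Set.add s i ≠ [] := by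
  rw [PySem.Set.add_eq_ite]
  split_ifs with h
  · intro hnil; rw [hnil] at h; exact (List.not_mem_nil h).elim
  · simp

theorem pvMaxD_add (s : PySem.Set Int) (i : Int) (hs : s ≠ []) :
    pvMaxD (PySem.Set.add s i) = max (pvMaxD s) i := by
  obtain ⟨x, t, rfl⟩ : ∃ x t, s = x :: t := by
    cases s with
    | nil => exact absurd rfl hs
    | cons x t => exact ⟨x, t, rfl⟩
  rw [PySem.Set.add_eq_ite]
  by_cases hm : i ∈ x :: t
  · have hle : i ≤ pvMaxD (x :: t) := by
      rcases List.mem_cons.mp hm with h | h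
      · simpa [pvMaxD, h] using (PySem.List.le_foldl_max t x).1
      · simpa [pvMaxD] using (PySem.List.le_foldl_max t x).2 i h
    rw [if_pos hm, max_eq_left hle]
  · rw [if_neg hm]
    simp [pvMaxD, List.foldl_append]

theorem foldl_add_ne_nil (xs : List Int) (s : PySem.Set Int) (hs : s ≠ []) :
    xs.foldl PySem.Set.add s ≠ [] := by
  induction xs generalizing s with
  | nil => exact hs
  | cons y t ih => exact ih _ (add_ne_nil s y)

theorem pvMaxD_foldl_add' (xs : List Int) (s : PySem.Set Int) (hs : s ≠ []) :
    pvMaxD (xs.foldl PySem.Set.add s) = xs.foldl max (pvMaxD s) := by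
  induction xs generalizing s with
  | nil => rfl
  | cons y t ih =>
    simp only [List.foldl_cons]
    rw [ih _ (add_ne_nil s y), pvMaxD_add s y hs]

-- folding the indices into a fresh set computes their maximum
theorem pvMaxD_foldl_add (xs : List Int) (h : xs ≠ []) :
    pvMaxD (xs.foldl PySem.Set.add PySem.Set.empty) = pvMaxD xs := by
  obtain ⟨y, t, rfl⟩ : ∃ y t, xs = y :: t := by
    cases xs with
    | nil => exact absurd rfl h
    | cons y t => exact ⟨y, t, rfl⟩
  have h1 : PySem.Set.add PySem.Set.empty y = [y] :=
    PySem.Set.add_of_not_mem (List.not_mem_nil)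
  simp only [List.foldl_cons, h1]
  exact pvMaxD_foldl_add' t [y] (by simp)

theorem foldl_add_empty_ne_nil (xs : List Int) (h : xs ≠ []) :
    xs.foldl PySem.Set.add PySem.Set.empty ≠ [] := by
  obtain ⟨y, t, rfl⟩ : ∃ y t, xs = y :: t := by
    cases xs with
    | nil => exact absurd rfl h
    | cons y t => exact ⟨y, t, rfl⟩
  have h1 : PySem.Set.add PySem.Set.empty y = [y] :=
    PySem.Set.add_of_not_mem (List.not_mem_nil)
  simp only [List.foldl_cons, h1]
  exact foldl_add_ne_nil t [y] (by simp)

-- a base that occurs among the pairs has a nonempty index list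
theorem filter_ne_nil (P : List (String × Int)) (k : String) (h : k ∈ P.map Prod.fst) :
    (P.filter (fun q => q.1 == k)).map (fun q => q.2) ≠ [] := by
  obtain ⟨q, hq, hqk⟩ := List.mem_map.mp h
  have : q ∈ P.filter (fun q => q.1 == k) :=
    List.mem_filter.mpr ⟨hq, by simp [hqk]⟩
  intro hnil
  rw [List.map_eq_nil_iff] at hnil
  rw [hnil] at this
  exact List.not_mem_nil this

-- ===== VERDICT (by name: the statement is the Claim_ definition above) =====
theorem infer_channel_spec_spec : Claim_equal_infer_channel_spec := by
  intro ip_types _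
  unfold Spec_infer_channel_spec infer_channel_spec infer_channel_spec_alt
  simp only [hoistA, hoistB, List.nil_append]
  set P : List (String × Int) := ip_types.filterMap pvParse with hP
  set dA : PySem.Dict String (PySem.Set Int) :=
    P.foldl (fun d p => d.insert p.1 (PySem.Set.add (d.getD p.1 PySem.Set.empty) p.2))
      PySem.Dict.empty with hdA
  -- keys of A's dict = B's `seen` list = deduped bases
  have hkeys : dA.keys = PySem.Set.ofList (P.map Prod.fst) := by
    rw [hdA, PySem.Dict.keys_foldl_insert_key P Prod.fst
      (fun d p => PySem.Set.add (d.getD p.1 PySem.Set.empty) p.2) PySem.Dict.empty]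
    simp [PySem.Set.update_nil_left]
  have hnd : dA.keys.Nodup := by
    rw [hkeys]; exact PySem.Set.nodup_ofList _
  have hseen : P.foldl (fun s p => if p.1 ∈ s then s else s ++ [p.1]) [] = dA.keys := by
    rw [PySem.List.foldl_congr_mem P _ (fun s p => PySem.Set.add s p.1) []
      (fun acc x _ => (PySem.Set.add_eq_ite acc x.1).symm)]
    rw [← PySem.Set.update_map_eq_foldl_add, PySem.Set.update_nil_left, hkeys]
  -- each value of A's dict: its max is the max over the filtered pairs
  have hval : ∀ k ∈ dA.keys,
      dA.getD k PySem.Set.empty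
        = ((P.filter (fun q => q.1 == k)).map (fun q => q.2)).foldl PySem.Set.add PySem.Set.empty := by
    intro k _
    rw [hdA, getD_fold, PySem.Dict.getD_empty]
  have hmem : ∀ k ∈ dA.keys, k ∈ P.map Prod.fst := by
    intro k hk
    rw [hkeys] at hk
    exact (PySem.Set.mem_ofList _ _).mp hk
  -- A's second loop, on members of dA.items, is a plain insert of pvMaxD + 1
  have hAloop : dA.items.foldl (fun spec p =>
      if p.2 ≠ [] then
        match PySem.List.max? p.2 (fun x => x) with
        | some m => spec.insert p.1 (m + 1)
        | none => spec
      else spec) PySem.Dict.empty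
    = dA.items.foldl (fun spec p => spec.insert p.1 (pvMaxD p.2 + 1)) PySem.Dict.empty := by
    apply PySem.List.foldl_congr_mem
    intro acc p hp
    have hpk : p.1 ∈ dA.keys := PySem.Dict.mem_keys_of_mem_items dA hp
    have hpv : p.2 = dA.getD p.1 PySem.Set.empty := by
      exact (PySem.Dict.getD_of_mem_items dA (by simpa using hp) hnd PySem.Set.empty).symm
    have hne : p.2 ≠ [] := by
      rw [hpv, hval p.1 hpk]
      exact foldl_add_empty_ne_nil _ (filter_ne_nil P p.1 (hmem p.1 hpk))
    rw [if_pos hne, pvMax?_eq_pvMaxD p.2 hne]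
  -- B's comprehension loop, on members of seen = dA.keys, inserts the same values
  have hBloop : dA.keys.foldl (fun d base =>
      match PySem.List.max? ((P.filter (fun q => q.1 == base)).map (fun q => q.2)) (fun x => x) with
      | some m => d.insert base (m + 1)
      | none => d) PySem.Dict.empty
    = dA.keys.foldl (fun d base => d.insert base (pvMaxD (dA.getD base PySem.Set.empty) + 1))
        PySem.Dict.empty := by
    apply PySem.List.foldl_congr_mem
    intro acc base hbase
    have hf := filter_ne_nil P base (hmem base hbase)
    rw [pvMax?_eq_pvMaxD _ hf, hval base hbase, pvMaxD_foldl_add _ hf]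
  -- both flattened loops insert fresh distinct keys, so their items are plain maps
  have hitems : dA.items = dA.keys.map (fun k => (k, dA.getD k PySem.Set.empty)) :=
    PySem.Dict.items_eq_map_keys dA hnd PySem.Set.empty
  have hAfinal : (dA.items.foldl (fun spec p => spec.insert p.1 (pvMaxD p.2 + 1))
      PySem.Dict.empty).items
      = dA.items.map (fun p => (p.1, pvMaxD p.2 + 1)) := by
    rw [PySem.Dict.items_foldl_insert_fresh dA.items Prod.fst (fun p => pvMaxD p.2 + 1)
      PySem.Dict.empty (fun a _ => PySem.Dict.contains_empty a.1) hnd]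
    simp [PySem.Dict.empty]
  have hBfinal : (dA.keys.foldl (fun d base =>
        d.insert base (pvMaxD (dA.getD base PySem.Set.empty) + 1)) PySem.Dict.empty).items
      = dA.keys.map (fun k => (k, pvMaxD (dA.getD k PySem.Set.empty) + 1)) := by
    rw [PySem.Dict.items_foldl_insert_fresh dA.keys (fun k => k)
      (fun k => pvMaxD (dA.getD k PySem.Set.empty) + 1)
      PySem.Dict.empty (fun a _ => PySem.Dict.contains_empty a) (by simpa using hnd)]
    simp [PySem.Dict.empty]
  rw [hseen, hAloop, hBloop, hAfinal, hBfinal, hitems, List.map_map]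
  rfl
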